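-- pv_equiv track=rewrite | github.com/HoopDead/2048_player | main.py | check_move_right
-- ===== SOURCE A (Python) =====
-- def check_move_right(list_of_tile_informations):
--     n = len(list_of_tile_informations)
--     list_of_operation = {"merged": 0, "tiles_after_move": 0}
--     for i in range(n):
--         v = []
--         w = []
--
--         for j in range(n - 1, -1, -1):
--
--             # if not 0
--             if (list_of_tile_informations[i][j]):
--                 v.append(list_of_tile_informations[i][j])
--
--         j = 0
--         while (j < len(v)):
--             if (j < len(v) - 1 and
--                v[j] == v[j + 1]):
--
--                 w.append(2 * v[j])
--                 j += 1
--                 list_of_operation["merged"] += 1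
--
--             else:
--                 w.append(v[j])
--                 list_of_operation["tiles_after_move"] += 1
--             j += 1
--
--         for j in range(n):
--             list_of_tile_informations[i][j] = 0
--
--         j = n - 1
--
--         for it in w:
--             list_of_tile_informations[i][j] = it
--             j -= 1
--     return list_of_operation
-- ===== SOURCE B (Python) =====
-- def check_move_right(list_of_tile_informations):
--     # Mutates the inner rows in place exactly like the original.
--     n = len(list_of_tile_informations)
--     merged = 0
--     tiles_after_move = 0
--     for row in list_of_tile_informations:
--         w = []
--         mergeable = False
--         row_merges = 0
--         for j in range(n - 1, -1, -1):
--             x = row[j]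
--             if not x:
--                 continue
--             if mergeable and w[-1] == x:
--                 w[-1] = 2 * x
--                 row_merges += 1
--                 mergeable = False
--             else:
--                 w.append(x)
--                 mergeable = True
--         merged += row_merges
--         tiles_after_move += len(w) - row_merges
--         for j in range(n):
--             row[j] = 0
--         j = n - 1
--         for it in w:
--             row[j] = it
--             j -= 1
--     return {"merged": merged, "tiles_after_move": tiles_after_move}
-- ===== Notes on version B (the rewrite author's own statement) =====
-- stated objective: simpler
-- what changed: B replaces A's three per-row phases (gather nonzeros into v, then an index-driven while loop pairing v[j] with v[j+1]) by one right-to-left pass per row that merges on the fly via a 'last element still mergeable' flag, deriving tiles_after_move as len(w) - row merges.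
import Mathlib
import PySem

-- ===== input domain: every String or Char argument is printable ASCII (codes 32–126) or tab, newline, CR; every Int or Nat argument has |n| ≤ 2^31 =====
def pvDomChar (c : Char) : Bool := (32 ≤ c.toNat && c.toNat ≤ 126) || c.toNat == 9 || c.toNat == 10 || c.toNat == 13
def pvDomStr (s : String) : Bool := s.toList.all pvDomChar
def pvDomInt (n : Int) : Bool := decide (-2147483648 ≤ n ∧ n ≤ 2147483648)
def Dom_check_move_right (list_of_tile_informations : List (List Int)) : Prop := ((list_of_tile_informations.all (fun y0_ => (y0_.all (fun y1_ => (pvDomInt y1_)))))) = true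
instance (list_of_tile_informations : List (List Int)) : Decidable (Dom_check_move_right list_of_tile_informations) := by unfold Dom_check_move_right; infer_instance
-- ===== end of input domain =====

-- B replaces A's three per-row phases (gather v, index-driven pairwise while loop) by one
-- right-to-left pass with a "last element still mergeable" flag; equal return value everywhere
-- A returns (A and B both mutate the argument rows in place; the claim is about the return value).


-- ===== PORT A =====
-- the 'while (j < len(v))' loop: w/merged/tiles_after_move state, advancing by 1 or 2
def mergeWhileA : List Int → List Int × Int × Int → List Int × Int × Int
  | [], st => st
  | [x], (w, m, t) => (w ++ [x], m, t + 1)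
  | x :: y :: rest, (w, m, t) =>
      if x = y then mergeWhileA rest (w ++ [2 * x], m + 1, t)
      else mergeWhileA (y :: rest) (w ++ [x], m, t + 1)

-- the body of A's 'for i in range(n)' loop on one row (counters threaded through st);
-- the final two 'for j' loops of the body only write the merged row back into the mutable
-- argument: the return value never reads it, so the pure port carries only the counters on
def rowA (n : Nat) (st : Int × Int) (row : List Int) : Int × Int :=
  let v := (PySem.List.pyRange ((n : Int) - 1) (-1) (-1)).foldl
    (fun v j => let x := PySem.List.pyGetD row j 0; if x ≠ 0 then v ++ [x] else v) []
  let r := mergeWhileA v ([], st.1, st.2)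
  (r.2.1, r.2.2)

def check_move_right (list_of_tile_informations : List (List Int)) : List (String × Int) :=
  let n := list_of_tile_informations.length
  let st := (PySem.List.pyRange 0 (n : Int) 1).foldl
    (fun st i => rowA n st (PySem.List.pyGetD list_of_tile_informations i []))
    ((0 : Int), (0 : Int))
  [("merged", st.1), ("tiles_after_move", st.2)]

-- ===== PORT B =====
-- one step of B's right-to-left pass; w is kept most-recent-first (Python appends and
-- reads/writes w[-1]; only w's length and its last element are ever used, so the head here
-- IS Python's w[-1])
def stepB (s : List Int × Bool × Int) (x : Int) : List Int × Bool × Int :=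
  if x = 0 then s
  else
    match s with
    | (y :: w', true, rm) =>
        if y = x then (2 * x :: w', false, rm + 1)
        else (x :: y :: w', true, rm)
    | (w, _, rm) => (x :: w, true, rm)

-- B's body for one row: merged += row_merges; tiles_after_move += len(w) - row_merges
-- (the write-back loops again only mutate the argument)
def rowB (n : Nat) (st : Int × Int) (row : List Int) : Int × Int :=
  let r := (PySem.List.pyRange ((n : Int) - 1) (-1) (-1)).foldl
    (fun s j => stepB s (PySem.List.pyGetD row j 0)) ([], false, (0 : Int))
  (st.1 + r.2.2, st.2 + ((r.1.length : Int) - r.2.2))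

def check_move_right_alt (list_of_tile_informations : List (List Int)) : List (String × Int) :=
  let n := list_of_tile_informations.length
  let st := list_of_tile_informations.foldl (rowB n) ((0 : Int), (0 : Int))
  [("merged", st.1), ("tiles_after_move", st.2)]

-- ===== PRECONDITION & SPEC =====
-- Pre_ excludes exactly the inputs where the Python A raises IndexError: a row shorter than
-- the number of rows is indexed out of range by 'list_of_tile_informations[i][j]'.
def Pre_check_move_right (list_of_tile_informations : List (List Int)) : Prop :=
  ∀ row ∈ list_of_tile_informations, list_of_tile_informations.length ≤ row.length
instance (list_of_tile_informations : List (List Int)) : Decidable (Pre_check_move_right list_of_tile_informations) := by unfold Pre_check_move_right; infer_instance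

def pvWitness_check_move_right : List (List Int) := [[2, 2], [0, 4]]

def Spec_check_move_right (list_of_tile_informations : List (List Int)) (out : List (String × Int)) : Prop := out = check_move_right_alt list_of_tile_informations
instance (list_of_tile_informations : List (List Int)) (out : List (String × Int)) : Decidable (Spec_check_move_right list_of_tile_informations out) := by unfold Spec_check_move_right; infer_instance

-- ===== CLAIM (what is proved, stated in full; the proofs are below) =====
def Claim_equal_check_move_right : Prop := ∀ (list_of_tile_informations : List (List Int)), Dom_check_move_right list_of_tile_informations → Pre_check_move_right list_of_tile_informations → Spec_check_move_right list_of_tile_informations (check_move_right list_of_tile_informations)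

-- ===== LEMMAS AND PROOFS =====

-- (merges, non-merged tiles) produced by the greedy pairwise scan of v
def cnt : List Int → Nat × Nat
  | [] => (0, 0)
  | [_] => (0, 1)
  | x :: y :: rest =>
      if x = y then ((cnt rest).1 + 1, (cnt rest).2)
      else ((cnt (y :: rest)).1, (cnt (y :: rest)).2 + 1)

theorem cnt_len (v : List Int) : (cnt v).1 + (cnt v).1 + (cnt v).2 = v.length := by
  fun_induction cnt v <;> simp_all <;> omega

theorem mergeWhileA_cnt (v : List Int) : ∀ (u : List Int) (m t : Int),
    (mergeWhileA v (u, m, t)).2 = (m + ((cnt v).1 : Int), t + ((cnt v).2 : Int)) := by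
  fun_induction cnt v <;> intro u m t <;> simp_all [mergeWhileA] <;> omega

-- A's gather loop builds exactly the nonzero values, in traversal order
theorem gatherA (g : Int → Int) : ∀ (js : List Int) (acc : List Int),
    js.foldl (fun v j => let x := g j; if x ≠ 0 then v ++ [x] else v) acc
      = acc ++ (js.map g).filter (fun x => x ≠ 0) := by
  intro js
  induction js with
  | nil => intro acc; simp
  | cons j rest ih =>
    intro acc
    rw [List.foldl_cons, ih]
    by_cases hj : g j = 0 <;> simp [hj]

-- stepB ignores zeros, so B's fold equals the fold over the nonzero values
theorem foldl_stepB_filter (l : List Int) : ∀ s : List Int × Bool × Int,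
    l.foldl stepB s = (l.filter (fun x => x ≠ 0)).foldl stepB s := by
  induction l with
  | nil => intro s; rfl
  | cons x rest ih =>
    intro s
    by_cases hx : x = 0
    · subst hx; simp [stepB, ih]
    · simp [hx, ih]

-- B's merge pass characterised against cnt, from a non-mergeable and a mergeable state
theorem foldB_cnt : ∀ (N : Nat) (v : List Int), v.length ≤ N → (∀ x ∈ v, x ≠ 0) →
    ((∀ (w : List Int) (rm : Int),
      (v.foldl stepB (w, false, rm)).1.length + (cnt v).1 = w.length + v.length ∧
      (v.foldl stepB (w, false, rm)).2.2 = rm + ((cnt v).1 : Int)) ∧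
    (∀ (y : Int) (w : List Int) (rm : Int),
      (v.foldl stepB (y :: w, true, rm)).1.length + (cnt (y :: v)).1 = w.length + 1 + v.length ∧
      (v.foldl stepB (y :: w, true, rm)).2.2 = rm + ((cnt (y :: v)).1 : Int))) := by
  intro N
  induction N with
  | zero =>
    intro v hlen _
    have hv : v = [] := List.eq_nil_of_length_eq_zero (Nat.le_zero.mp hlen)
    subst hv
    constructor
    · intro w rm; simp [cnt]
    · intro y w rm; simp [cnt]
  | succ N ih =>
    intro v hlen hz
    constructor
    · intro w rm
      cases v with
      | nil => simp [cnt]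
      | cons x rest =>
        have hx : x ≠ 0 := hz x (by simp)
        have hrest : ∀ z ∈ rest, z ≠ 0 := fun z hzm => hz z (by simp [hzm])
        have hlr : rest.length ≤ N := by simp at hlen; omega
        have h1 := (ih rest hlr hrest).2 x w rm
        simp only [List.foldl_cons, stepB, if_neg hx]
        constructor
        · have := h1.1; simp at this ⊢; omega
        · exact h1.2
    · intro y w rm
      cases v with
      | nil => simp [cnt]
      | cons x rest =>
        have hx : x ≠ 0 := hz x (by simp)
        have hrest : ∀ z ∈ rest, z ≠ 0 := fun z hzm => hz z (by simp [hzm])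
        have hlr : rest.length ≤ N := by simp at hlen; omega
        by_cases hyx : y = x
        · have h1 := (ih rest hlr hrest).1 (2 * x :: w) (rm + 1)
          simp only [List.foldl_cons, stepB, if_neg hx, if_pos hyx]
          simp only [cnt, if_pos hyx]
          constructor
          · have := h1.1; simp at this ⊢; omega
          · have := h1.2; simp at this ⊢; omega
        · have h1 := (ih rest hlr hrest).2 x (y :: w) rm
          simp only [List.foldl_cons, stepB, if_neg hx, if_neg hyx]
          simp only [cnt, if_neg hyx]
          constructor
          · have := h1.1; simp at this ⊢; omega
          · exact h1.2

-- the two per-row bodies agree on every row and counter state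
theorem rowstep_eq (n : Nat) (st : Int × Int) (row : List Int) :
    rowA n st row = rowB n st row := by
  unfold rowA rowB
  have hmapped : (PySem.List.pyRange ((n : Int) - 1) (-1) (-1)).foldl
      (fun s j => stepB s (PySem.List.pyGetD row j 0)) ([], false, (0 : Int))
      = ((PySem.List.pyRange ((n : Int) - 1) (-1) (-1)).map
          (fun j => PySem.List.pyGetD row j 0)).foldl stepB ([], false, (0 : Int)) := by
    rw [List.foldl_map]
  set js := PySem.List.pyRange ((n : Int) - 1) (-1) (-1) with hjs
  set v := (js.map (fun j => PySem.List.pyGetD row j 0)).filter (fun x => x ≠ 0) with hv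
  have hz : ∀ x ∈ v, x ≠ 0 := by
    intro x hx
    have := List.of_mem_filter hx
    simpa using this
  obtain ⟨hb1, hb2⟩ := (foldB_cnt v.length v le_rfl hz).1 [] 0
  rw [hmapped, foldl_stepB_filter, ← hv]
  rw [gatherA (fun j => PySem.List.pyGetD row j 0) js []]
  simp only [List.nil_append, ← hv]
  rw [mergeWhileA_cnt v [] st.1 st.2]
  have hcl := cnt_len v
  have h1 : ((v.foldl stepB ([], false, (0:Int))).1.length : Int) + ((cnt v).1 : Int)
      = (v.length : Int) := by simp at hb1; exact_mod_cast hb1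
  refine Prod.ext ?_ ?_
  · simp [hb2]
  · simp only []
    rw [hb2]
    have h2 : ((cnt v).1 : Int) + ((cnt v).1 : Int) + ((cnt v).2 : Int) = (v.length : Int) := by
      exact_mod_cast hcl
    omega

-- ===== VERDICT (by name: the statement is the Claim_ definition above) =====
theorem check_move_right_spec : Claim_equal_check_move_right := by
  intro L _ _
  unfold Spec_check_move_right check_move_right check_move_right_alt
  have h1 : (PySem.List.pyRange 0 ((L.length : Int)) 1).foldl
      (fun st i => rowA L.length st (PySem.List.pyGetD L i [])) ((0 : Int), (0 : Int))
      = L.foldl (rowA L.length) ((0 : Int), (0 : Int)) :=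
    PySem.List.foldl_pyRange_zero_pyGetD' L [] (rowA L.length) ((0 : Int), (0 : Int))
  have h2 : L.foldl (rowA L.length) ((0 : Int), (0 : Int))
      = L.foldl (rowB L.length) ((0 : Int), (0 : Int)) :=
    PySem.List.foldl_congr_mem L _ _ _ (fun st row _ => rowstep_eq L.length st row)
  simp only [h1, h2]
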